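-- pv_equiv track=rewrite | github.com/klephron/mals-test | scripts/common_normalize.py | line_col_offset
-- ===== SOURCE A (Python) =====
-- def line_col_offset(text: str) -> dict[str, int]:
--     line = 0
--     character = 0
--     for ch in text:
--         if ch == "\n":
--             line += 1
--             character = 0
--         else:
--             character += 1
--     return {"line": line, "character": character, "offset": len(text)}
-- ===== SOURCE B (Python) =====
-- def line_col_offset(text: str) -> dict[str, int]:
--     parts = text.split("\n")
--     return {"line": len(parts) - 1, "character": len(parts[-1]), "offset": len(text)}
-- ===== Notes on version B (the rewrite author's own statement) =====
-- stated objective: idiomatic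
-- what changed: Replaces the character-by-character branching loop with a single split on newline: the line count is the number of segments minus one and the column is the length of the last segment.
import Mathlib
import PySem

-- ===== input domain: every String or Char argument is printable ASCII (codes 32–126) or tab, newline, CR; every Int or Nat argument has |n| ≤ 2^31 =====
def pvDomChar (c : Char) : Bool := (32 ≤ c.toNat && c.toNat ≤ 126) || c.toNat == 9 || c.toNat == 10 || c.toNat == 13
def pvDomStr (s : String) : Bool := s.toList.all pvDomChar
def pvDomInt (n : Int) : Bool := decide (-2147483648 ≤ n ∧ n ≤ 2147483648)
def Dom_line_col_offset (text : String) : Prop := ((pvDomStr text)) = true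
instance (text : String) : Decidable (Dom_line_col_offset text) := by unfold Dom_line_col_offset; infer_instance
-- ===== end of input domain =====

-- B replaces A's character-by-character branching loop with one split on "\n":
-- line = number of segments - 1, character = length of the last segment (idiomatic decomposition, same cost).


-- ===== PORT A =====
-- the loop: for ch in text: if ch == "\n": line += 1; character = 0 else: character += 1
def line_col_offset (text : String) : List (String × Int) :=
  let p := text.toList.foldl
    (fun (p : Int × Int) ch => if ch == '\n' then (p.1 + 1, 0) else (p.1, p.2 + 1))
    (0, 0)
  [("line", p.1), ("character", p.2), ("offset", PySem.Str.len text)]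

-- ===== PORT B =====
-- parts = text.split("\n"); {"line": len(parts)-1, "character": len(parts[-1]), "offset": len(text)}
def line_col_offset_alt (text : String) : List (String × Int) :=
  let parts := PySem.Chars.splitOn text.toList "\n".toList
  [("line", (parts.length : Int) - 1),
   ("character", ((PySem.List.pyGetD parts (-1) []).length : Int)),
   ("offset", PySem.Str.len text)]

-- ===== PRECONDITION & SPEC =====
def Spec_line_col_offset (text : String) (out : List (String × Int)) : Prop := out = line_col_offset_alt text
instance (text : String) (out : List (String × Int)) : Decidable (Spec_line_col_offset text out) := by unfold Spec_line_col_offset; infer_instance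

-- ===== CLAIM (what is proved, stated in full; the proofs are below) =====
def Claim_equal_line_col_offset : Prop := ∀ (text : String), Dom_line_col_offset text → Spec_line_col_offset text (line_col_offset text)

-- ===== LEMMAS AND PROOFS =====

-- the result of splitting cs on '\n' given a reversed partial current segment cur
def pvConsume (l : List Char) (cur : List Char) : List (List Char) :=
  match l with
  | [] => [cur.reverse]
  | c :: rest => if c == '\n' then cur.reverse :: pvConsume rest [] else pvConsume rest (c :: cur)

theorem pvConsume_ne_nil (l cur : List Char) : pvConsume l cur ≠ [] := by
  induction l generalizing cur with
  | nil => simp [pvConsume]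
  | cons c rest ih =>
    simp only [pvConsume]
    split
    · simp
    · exact ih _

theorem pvSplitOn_go_eq (fuel : Nat) (l cur : List Char) (acc : List (List Char))
    (h : l.length ≤ fuel) :
    PySem.Chars.splitOn.go ['\n'] fuel l cur acc = acc.reverse ++ pvConsume l cur := by
  induction fuel generalizing l cur acc with
  | zero =>
    have : l = [] := List.eq_nil_of_length_eq_zero (Nat.le_zero.mp h)
    subst this
    simp [PySem.Chars.splitOn.go, pvConsume]
  | succ fuel ih =>
    cases l with
    | nil => simp [PySem.Chars.splitOn.go, pvConsume]
    | cons c rest =>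
      simp only [PySem.Chars.splitOn.go]
      by_cases hc : c = '\n'
      · subst hc
        have hpre : List.isPrefixOf ['\n'] ('\n' :: rest) = true := by simp [List.isPrefixOf]
        simp only [hpre, if_pos]
        rw [ih _ _ _ (by simpa using Nat.le_of_succ_le_succ h)]
        simp [pvConsume]
      · have hpre : List.isPrefixOf ['\n'] (c :: rest) = false := by
          simp [List.isPrefixOf, Ne.symm hc]
        simp only [hpre]
        rw [if_neg (by simp)]
        rw [ih _ _ _ (Nat.le_of_succ_le_succ h)]
        simp [pvConsume, hc]

theorem pvSplitOn_eq_consume (cs : List Char) :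
    PySem.Chars.splitOn cs ['\n'] = pvConsume cs [] := by
  unfold PySem.Chars.splitOn
  simpa using pvSplitOn_go_eq (cs.length + 1) cs [] [] (by omega)

-- A's loop computes the segment count and the last segment's length
theorem pvFold_eq_consume (l : List Char) (cur : List Char) (line : Int) :
    l.foldl (fun (p : Int × Int) ch => if ch == '\n' then (p.1 + 1, 0) else (p.1, p.2 + 1))
      (line, (cur.length : Int)) =
    (line + ((pvConsume l cur).length : Int) - 1, (((pvConsume l cur).getLastD []).length : Int)) := by
  induction l generalizing cur line with
  | nil => simp [pvConsume]
  | cons c rest ih =>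
    by_cases hc : c = '\n'
    · subst hc
      simp only [List.foldl_cons, beq_self_eq_true, if_true]
      have := ih ([] : List Char) (line + 1)
      simp only [List.length_nil, Int.natCast_zero] at this
      rw [this]
      have hne := pvConsume_ne_nil rest ([] : List Char)
      simp only [pvConsume, beq_self_eq_true, if_true]
      cases hcr : pvConsume rest ([] : List Char) with
      | nil => exact absurd hcr hne
      | cons x xs => simp; omega
    · simp only [List.foldl_cons]
      rw [if_neg (by simp [hc])]
      have := ih (c :: cur) line
      simp only [List.length_cons] at this
      rw [show (cur.length : Int) + 1 = ((cur.length + 1 : Nat) : Int) by omega, this]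
      simp only [pvConsume]
      rw [if_neg (by simp [hc])]

theorem pvMain (text : String) : line_col_offset text = line_col_offset_alt text := by
  unfold line_col_offset line_col_offset_alt
  dsimp only
  rw [show "\n".toList = ['\n'] from rfl, pvSplitOn_eq_consume]
  have hne := pvConsume_ne_nil text.toList ([] : List Char)
  rw [PySem.List.pyGetD_neg_one _ _ hne]
  have := pvFold_eq_consume text.toList [] 0
  simp only [List.length_nil, Int.natCast_zero] at this
  rw [this]
  simp [List.getLast?_eq_some_getLast hne]

-- ===== VERDICT (by name: the statement is the Claim_ definition above) =====
theorem line_col_offset_spec : Claim_equal_line_col_offset := by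
  intro text _
  exact pvMain text
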